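-- pv_equiv track=rewrite | github.com/amitsing8/cs224ndef | data_augment.py | getTranlateDict
-- ===== SOURCE A (Python) =====
-- def getTranlateDict(ctx, answerIndices):
--     dictOfAnswers = {}
--     nextIndex = 0
--     for k, v in enumerate(ctx):
--         if v == ".":
--             if len(answerIndices) > 0:
--                 if answerIndices[0] >= nextIndex and answerIndices[0] <= k-1:
--                     dictOfAnswers[(nextIndex, k-1)] = False
--                     answerIndices.remove(answerIndices[0])
--                 else:
--                     dictOfAnswers[(nextIndex, k-1)] = True
--                 nextIndex = k
--     return dictOfAnswers
-- ===== SOURCE B (Python) =====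
-- def getTranlateDict(ctx, answerIndices):
--     # Answer-driven block algorithm: instead of testing the front answer against
--     # every sentence span one by one, binary-search the '.'-position list for the
--     # span containing the front answer, emit the skipped spans as a True-block,
--     # the found span as False, then continue on the remaining dots.
--     dots = [k for k, c in enumerate(ctx) if c == "."]
--     result = {}
--     start = 0
--     while answerIndices and dots:
--         a = answerIndices[0]
--         if a < start:
--             break  # front answer lies before every remaining span: no more matches
--         # binary search: first index j with dots[j] > a
--         lo, hi = 0, len(dots)
--         while lo < hi:
--             mid = (lo + hi) // 2
--             if dots[mid] > a:
--                 hi = mid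
--             else:
--                 lo = mid + 1
--         j = lo
--         if j == len(dots):
--             break  # front answer lies at/after the last dot: no more matches
--         s = start
--         for d in dots[:j]:
--             result[(s, d - 1)] = True
--             s = d
--         result[(s, dots[j] - 1)] = False
--         answerIndices.remove(a)
--         start = dots[j]
--         dots = dots[j + 1:]
--     if answerIndices:
--         # a stuck front answer (or none consumed): every remaining span is True
--         s = start
--         for d in dots:
--             result[(s, d - 1)] = True
--             s = d
--     return result
-- ===== Notes on version B (the rewrite author's own statement) =====
-- stated objective: alternative
-- what changed: A walks every character and tests each sentence span against the front answer one span at a time; B inverts the control: it binary-searches the precomputed '.'-position list for the span containing the current front answer, emits all skipped spans as one True-block plus the matched span as False, and repeats on the remaining dots (preserving the identical in-place mutation of answerIndices).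
import Mathlib
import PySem

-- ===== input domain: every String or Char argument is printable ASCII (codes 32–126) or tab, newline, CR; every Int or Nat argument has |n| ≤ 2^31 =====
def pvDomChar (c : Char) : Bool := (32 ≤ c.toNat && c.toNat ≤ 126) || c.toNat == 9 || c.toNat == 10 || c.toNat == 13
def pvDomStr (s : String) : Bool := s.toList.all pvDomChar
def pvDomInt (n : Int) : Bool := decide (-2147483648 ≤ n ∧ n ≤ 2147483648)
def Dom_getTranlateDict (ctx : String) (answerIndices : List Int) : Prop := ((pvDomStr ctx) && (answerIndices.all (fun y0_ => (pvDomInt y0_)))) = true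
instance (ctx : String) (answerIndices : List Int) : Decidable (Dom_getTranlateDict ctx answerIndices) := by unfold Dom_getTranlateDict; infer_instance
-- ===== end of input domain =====

-- B replaces A's per-character stateful scan by an answer-driven block algorithm: binary-search
-- the '.'-position list for the span containing the front answer, emit the skipped spans as a
-- True-block, the found span as False, and continue on the remaining dots; same return value,
-- and both Pythons mutate answerIndices identically (the equivalence proved is about the return value).

-- ===== PORT A =====
-- one iteration of A's for-loop body; state = (dictOfAnswers, nextIndex, answerIndices)
def pvStepA (st : PySem.Dict (Int × Int) Bool × Int × List Int) (kv : Int × Char) :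
    PySem.Dict (Int × Int) Bool × Int × List Int :=
  let (d, nextIndex, ai) := st
  if kv.2 == '.' then
    if ai.length > 0 then
      match ai with
      | [] => (d, nextIndex, ai)   -- unreachable: guarded by length > 0
      | a0 :: _ =>
        if a0 ≥ nextIndex ∧ a0 ≤ kv.1 - 1 then
          (d.insert (nextIndex, kv.1 - 1) false, kv.1, (PySem.List.remove? ai a0).getD ai)
        else
          (d.insert (nextIndex, kv.1 - 1) true, kv.1, ai)
    else (d, nextIndex, ai)
  else (d, nextIndex, ai)

def getTranlateDict (ctx : String) (answerIndices : List Int) : List (Int × Int × Bool) :=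
  let st := (PySem.List.enumerate ctx.toList 0).foldl pvStepA (PySem.Dict.empty, 0, answerIndices)
  st.1.items.map (fun p => (p.1.1, p.1.2, p.2))

-- ===== PORT B =====
-- Source B's inner binary search: first index j in [lo, hi) with dots[j] > a (or hi).
-- fuel = interval width, a totality guard: the interval shrinks by ≥ 1 each iteration
def pvBSF (dots : List Int) (a : Int) : Nat → Int → Int → Int
  | 0, lo, _ => lo
  | fuel + 1, lo, hi =>
    if lo < hi then
      let mid := PySem.Int.floordiv (lo + hi) 2
      if a < PySem.List.pyGetD dots mid 0 then pvBSF dots a fuel lo mid   -- index in range whenever 0 ≤ lo ≤ mid < hi ≤ len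
      else pvBSF dots a fuel (mid + 1) hi
    else lo

def pvBS (dots : List Int) (a : Int) (lo hi : Int) : Int := pvBSF dots a (hi - lo).toNat lo hi

-- Source B's 'for d in …: result[(s, d-1)] = True; s = d' run, returning the dict and final s
def pvTrueRun (res : PySem.Dict (Int × Int) Bool) (s : Int) :
    List Int → PySem.Dict (Int × Int) Bool × Int
  | [] => (res, s)
  | d :: rest => pvTrueRun (res.insert (s, d - 1) true) d rest

-- Source B's while loop plus the trailing True-run (executed when answerIndices is non-empty).
-- fuel = number of dots, a totality guard: each iteration drops ≥ 1 dot
def pvLoopBF : Nat → List Int → List Int → Int → PySem.Dict (Int × Int) Bool →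
    PySem.Dict (Int × Int) Bool
  | 0, _, _, _, res => res
  | fuel + 1, dots, ai, start, res =>
    match ai with
    | [] => res
    | a :: t =>
      if dots.isEmpty then (pvTrueRun res start dots).1   -- while exits (dots empty); trailing run
      else
        if a < start then (pvTrueRun res start dots).1    -- break; trailing run
        else
          let j := pvBS dots a 0 (dots.length : Int)
          if j = (dots.length : Int) then (pvTrueRun res start dots).1   -- break; trailing run
          else
            let p := pvTrueRun res start (PySem.List.slice dots none (some j))   -- dots[:j]
            let dj := PySem.List.pyGetD dots j 0                                 -- dots[j], in range
            pvLoopBF fuel (PySem.List.slice dots (some (j + 1)))                 -- dots[j+1:]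
              ((PySem.List.remove? (a :: t) a).getD (a :: t)) dj
              (p.1.insert (p.2, dj - 1) false)

def getTranlateDict_alt (ctx : String) (answerIndices : List Int) : List (Int × Int × Bool) :=
  let dots := ((PySem.List.enumerate ctx.toList 0).filter (fun kv => kv.2 == '.')).map (·.1)
  (pvLoopBF dots.length dots answerIndices 0 PySem.Dict.empty).items.map (fun p => (p.1.1, p.1.2, p.2))

-- ===== PRECONDITION & SPEC =====
def Spec_getTranlateDict (ctx : String) (answerIndices : List Int) (out : List (Int × Int × Bool)) : Prop := out = getTranlateDict_alt ctx answerIndices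
instance (ctx : String) (answerIndices : List Int) (out : List (Int × Int × Bool)) : Decidable (Spec_getTranlateDict ctx answerIndices out) := by unfold Spec_getTranlateDict; infer_instance

-- ===== CLAIM (what is proved, stated in full; the proofs are below) =====
def Claim_equal_getTranlateDict : Prop := ∀ (ctx : String) (answerIndices : List Int), Dom_getTranlateDict ctx answerIndices → Spec_getTranlateDict ctx answerIndices (getTranlateDict ctx answerIndices)

-- ===== LEMMAS AND PROOFS =====

-- A's loop body, specialised to a dot position
def pvStepDot (st : PySem.Dict (Int × Int) Bool × Int × List Int) (k : Int) :
    PySem.Dict (Int × Int) Bool × Int × List Int := pvStepA st (k, '.')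

-- sentence spans of a dot list starting from a given left boundary
def pvSpansFrom (next : Int) : List Int → List (Int × Int)
  | [] => []
  | d :: rest => (next, d - 1) :: pvSpansFrom d rest

-- the common reference computation: walk the spans, consuming the front of the answer list
def pvConsume : List (Int × Int) → List Int → PySem.Dict (Int × Int) Bool →
    PySem.Dict (Int × Int) Bool
  | [], _, r => r
  | _ :: _, [], r => r
  | (s, e) :: rest, a :: ai, r =>
    if s ≤ a ∧ a ≤ e then
      pvConsume rest ((PySem.List.remove? (a :: ai) a).getD (a :: ai)) (r.insert (s, e) false)
    else
      pvConsume rest (a :: ai) (r.insert (s, e) true)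

lemma pvStepA_non_dot {st : PySem.Dict (Int × Int) Bool × Int × List Int} {k : Int} {c : Char}
    (h : c ≠ '.') : pvStepA st (k, c) = st := by
  obtain ⟨d, n, ai⟩ := st
  simp [pvStepA, h]

-- A's fold over the enumerated string = a fold over the dot positions only
lemma L1 (cs : List Char) (i : Int) (st : PySem.Dict (Int × Int) Bool × Int × List Int) :
    (PySem.List.enumerate cs i).foldl pvStepA st
      = (((PySem.List.enumerate cs i).filter (fun kv => kv.2 == '.')).map (·.1)).foldl pvStepDot st := by
  induction cs generalizing i st with
  | nil => simp [PySem.List.enumerate_nil]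
  | cons c cs ih =>
    rw [PySem.List.enumerate_cons]
    by_cases h : c = '.'
    · subst h
      simp only [List.foldl_cons, List.filter_cons, beq_self_eq_true, if_pos, List.map_cons]
      rw [ih]; rfl
    · simp only [List.foldl_cons, List.filter_cons]
      rw [pvStepA_non_dot h, if_neg (by simpa using h), ih]

-- the dot fold with an empty answer list never changes the dict
lemma L3 (dots : List Int) (D : PySem.Dict (Int × Int) Bool) (n : Int) :
    (dots.foldl pvStepDot (D, n, ([] : List Int))).1 = D := by
  induction dots generalizing n with
  | nil => rfl
  | cons d rest ih => simpa [pvStepDot, pvStepA] using ih n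

-- A-side invariant: A's dot fold computes the consuming walk over the spans
lemma L4 (dots : List Int) (next : Int) (ai : List Int) (D : PySem.Dict (Int × Int) Bool) :
    (dots.foldl pvStepDot (D, next, ai)).1 = pvConsume (pvSpansFrom next dots) ai D := by
  induction dots generalizing next ai D with
  | nil => cases ai <;> rfl
  | cons d rest ih =>
    cases ai with
    | nil =>
      simp only [List.foldl_cons, pvSpansFrom, pvConsume]
      simpa [pvStepDot, pvStepA] using L3 rest D next
    | cons a t =>
      simp only [List.foldl_cons, pvSpansFrom, pvConsume]
      by_cases h : next ≤ a ∧ a ≤ d - 1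
      · rw [if_pos h, PySem.List.remove?_cons_self, Option.getD_some]
        have h' : a ≥ next ∧ a ≤ d - 1 := by simpa [ge_iff_le] using h
        have hs : pvStepDot (D, next, a :: t) d
            = (D.insert (next, d - 1) false, d, t) := by
          simp [pvStepDot, pvStepA, h', PySem.List.remove?_cons_self]
        rw [hs, ih]
      · rw [if_neg h]
        have hs : pvStepDot (D, next, a :: t) d
            = (D.insert (next, d - 1) true, d, a :: t) := by
          simp only [pvStepDot, pvStepA]
          rw [if_pos (by decide), if_pos (by simp), if_neg (by simpa [ge_iff_le] using h)]
        rw [hs, ih]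

-- the dot positions extracted from the enumeration are strictly increasing and ≥ the start index
lemma Ldots (cs : List Char) (i : Int) :
    (((PySem.List.enumerate cs i).filter (fun kv => kv.2 == '.')).map (·.1)).Pairwise (· < ·) ∧
    ∀ d ∈ ((PySem.List.enumerate cs i).filter (fun kv => kv.2 == '.')).map (·.1), i ≤ d := by
  induction cs generalizing i with
  | nil => simp [PySem.List.enumerate_nil]
  | cons c cs ih =>
    rw [PySem.List.enumerate_cons]
    obtain ⟨ihp, ihb⟩ := ih (i + 1)
    by_cases h : c = '.'
    · subst h
      simp only [List.filter_cons, beq_self_eq_true, if_pos, List.map_cons]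
      refine ⟨List.pairwise_cons.2 ⟨fun d hd => by have := ihb d hd; omega, ihp⟩,
        fun d hd => ?_⟩
      rcases List.mem_cons.1 hd with h1 | h2
      · omega
      · have := ihb d h2; omega
    · simp only [List.filter_cons]
      rw [if_neg (by simpa using h)]
      exact ⟨ihp, fun d hd => by have := ihb d hd; omega⟩

-- characterisation of the binary-search result: first index whose dot exceeds a
def pvIsBnd (dots : List Int) (a : Int) (j : Int) : Prop :=
  0 ≤ j ∧ j ≤ dots.length ∧ (∀ k : Nat, k < j.toNat → dots.getD k 0 ≤ a) ∧
  (∀ k : Nat, j.toNat ≤ k → k < dots.length → a < dots.getD k 0)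

lemma sorted_getD_le (dots : List Int) (hs : dots.Pairwise (· < ·)) {k l : Nat}
    (hk : k ≤ l) (hl : l < dots.length) : dots.getD k 0 ≤ dots.getD l 0 := by
  rcases Nat.lt_or_ge k l with h | h
  · rw [List.getD_eq_getElem _ _ (by omega), List.getD_eq_getElem _ _ hl]
    exact le_of_lt (List.pairwise_iff_getElem.1 hs k l (by omega) hl h)
  · have : k = l := by omega
    subst this; rfl

lemma pvBSF_isBnd_aux (dots : List Int) (a : Int) (hs : dots.Pairwise (· < ·)) (fuel : Nat) :
    ∀ (lo hi : Int), (hi - lo).toNat ≤ fuel →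
    0 ≤ lo → hi ≤ dots.length → lo ≤ hi →
    (∀ k : Nat, k < lo.toNat → dots.getD k 0 ≤ a) →
    (∀ k : Nat, hi.toNat ≤ k → k < dots.length → a < dots.getD k 0) →
    pvIsBnd dots a (pvBSF dots a fuel lo hi) := by
  induction fuel with
  | zero =>
    intro lo hi hfuel h0 h1 hlh hlow hhigh
    have : lo = hi := by omega
    subst this
    exact ⟨h0, h1, hlow, hhigh⟩
  | succ fuel ih =>
    intro lo hi hfuel h0 h1 hlh hlow hhigh
    rw [pvBSF]
    by_cases hlt : lo < hi
    · rw [if_pos hlt]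
      have h2 := PySem.Int.floordiv_mul_add_mod (lo + hi) 2
      have h3 := PySem.Int.mod_nonneg (lo + hi) (by norm_num : (0:Int) < 2)
      have h4 := PySem.Int.mod_lt (lo + hi) (by norm_num : (0:Int) < 2)
      by_cases hc : a < PySem.List.pyGetD dots (PySem.Int.floordiv (lo + hi) 2) 0
      · rw [if_pos hc]
        rw [PySem.List.pyGetD_of_nonneg _ _ (by omega)] at hc
        refine ih lo _ (by omega) h0 (by omega) (by omega) hlow (fun k hk1 hk2 => ?_)
        exact lt_of_lt_of_le hc (sorted_getD_le dots hs (by omega) hk2)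
      · rw [if_neg hc]
        rw [PySem.List.pyGetD_of_nonneg _ _ (by omega), Int.not_lt] at hc
        refine ih _ hi (by omega) (by omega) h1 (by omega) (fun k hk => ?_) hhigh
        exact le_trans (sorted_getD_le dots hs (by omega) (by omega)) hc
    · rw [if_neg hlt]
      have : lo = hi := by omega
      subst this
      exact ⟨h0, h1, hlow, hhigh⟩

lemma pvBS_isBnd (dots : List Int) (a : Int) (hs : dots.Pairwise (· < ·)) :
    pvIsBnd dots a (pvBS dots a 0 (dots.length : Int)) := by
  refine pvBSF_isBnd_aux dots a hs _ 0 (dots.length : Int) le_rfl le_rfl le_rfl (by positivity)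
    (fun k hk => by omega) (fun k hk1 hk2 => by omega)

lemma pvIsBnd_uniq {dots : List Int} {a j1 j2 : Int}
    (h1 : pvIsBnd dots a j1) (h2 : pvIsBnd dots a j2) : j1 = j2 := by
  obtain ⟨h10, h1l, h1a, h1b⟩ := h1
  obtain ⟨h20, h2l, h2a, h2b⟩ := h2
  by_contra hne
  rcases Int.lt_or_lt_of_ne hne with h | h
  · have ha := h2a j1.toNat (by omega)
    have hb := h1b j1.toNat le_rfl (by omega)
    omega
  · have ha := h1a j2.toNat (by omega)
    have hb := h2b j2.toNat le_rfl (by omega)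
    omega

lemma pvIsBnd_cons {d a : Int} {rest : List Int} {j : Int} (hda : d ≤ a)
    (h : pvIsBnd rest a j) : pvIsBnd (d :: rest) a (j + 1) := by
  obtain ⟨h0, hl, ha, hb⟩ := h
  refine ⟨by omega, by simp; omega, fun k hk => ?_, fun k hk1 hk2 => ?_⟩
  · cases k with
    | zero => simpa using hda
    | succ k => simpa using ha k (by omega)
  · cases k with
    | zero => omega
    | succ k => simpa using hb k (by omega) (by simpa using hk2)

lemma pvIsBnd_zero {d a : Int} {rest : List Int} (had : a < d)
    (hs : (d :: rest).Pairwise (· < ·)) : pvIsBnd (d :: rest) a 0 := by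
  refine ⟨le_rfl, by positivity, fun k hk => by omega, fun k _ hk2 => ?_⟩
  have h0 : (d :: rest).getD 0 0 = d := rfl
  calc a < d := had
    _ = (d :: rest).getD 0 0 := rfl
    _ ≤ (d :: rest).getD k 0 := sorted_getD_le _ hs (Nat.zero_le k) hk2

-- no remaining span can match: every span lies strictly right of a
lemma NOMATCH1 (dots : List Int) (a start : Int) (t : List Int)
    (res : PySem.Dict (Int × Int) Bool)
    (ha : a < start) (hb : ∀ d ∈ dots, a < d) :
    pvConsume (pvSpansFrom start dots) (a :: t) res = (pvTrueRun res start dots).1 := by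
  induction dots generalizing start res with
  | nil => rfl
  | cons d rest ih =>
    have hsd : a < d := hb d (by simp)
    simp only [pvSpansFrom, pvConsume, pvTrueRun]
    rw [if_neg (by omega)]
    exact ih d _ hsd (fun e he => hb e (by simp [he]))

-- B's loop steps through an unmatched head span exactly like the span walk does
lemma UNROLL (fuel : Nat) (d : Int) (rest : List Int) (a : Int) (t : List Int) (start : Int)
    (res : PySem.Dict (Int × Int) Bool)
    (hs : (d :: rest).Pairwise (· < ·)) (hstart : start ≤ d) (hda : d ≤ a) :
    pvLoopBF (fuel + 1) (d :: rest) (a :: t) start res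
      = pvLoopBF (fuel + 1) rest (a :: t) d (res.insert (start, d - 1) true) := by
  have hs' : rest.Pairwise (· < ·) := (List.pairwise_cons.1 hs).2
  have hbnd' := pvBS_isBnd rest a hs'
  have hshift : pvBS (d :: rest) a 0 (((d :: rest).length : Nat) : Int)
      = pvBS rest a 0 ((rest.length : Nat) : Int) + 1 :=
    pvIsBnd_uniq (pvBS_isBnd _ a hs) (pvIsBnd_cons hda hbnd')
  obtain ⟨hj0, hjl, hja, hjb⟩ := hbnd'
  rw [pvLoopBF]
  simp only [List.isEmpty_cons, hshift]
  rw [if_neg (show ¬(false = true) by simp), if_neg (show ¬(a < start) by omega)]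
  by_cases hlen : pvBS rest a 0 ((rest.length : Nat) : Int) = ((rest.length : Nat) : Int)
  · rw [if_pos (by rw [hlen]; simp)]
    have h1 : pvTrueRun res start (d :: rest)
        = pvTrueRun (res.insert (start, d - 1) true) d rest := rfl
    rw [h1]
    cases rest with
    | nil => rw [pvLoopBF]; simp [pvTrueRun]
    | cons e erest =>
      rw [pvLoopBF]
      rw [if_neg (show ¬((e :: erest).isEmpty = true) by simp),
        if_neg (show ¬(a < d) by omega), if_pos hlen]
  · rw [if_neg (by
      simp only [List.length_cons, Nat.cast_add, Nat.cast_one]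
      omega)]
    have hrest : rest ≠ [] := by
      intro hnil
      apply hlen
      subst hnil
      simp only [List.length_nil, Nat.cast_zero] at hj0 hjl ⊢
      omega
    rw [pvLoopBF]
    rw [if_neg (show ¬(rest.isEmpty = true) by simpa using hrest),
      if_neg (show ¬(a < d) by omega), if_neg hlen]
    set j' := pvBS rest a 0 ((rest.length : Nat) : Int) with hj'
    have hlt : j' < ((rest.length : Nat) : Int) := by omega
    have ht1 : (j' + 1).toNat = j'.toNat + 1 := by omega
    have ht2 : (j' + 1 + 1).toNat = j'.toNat + 1 + 1 := by omega
    have e1 : PySem.List.slice (d :: rest) (some (j' + 1 + 1))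
        = PySem.List.slice rest (some (j' + 1)) := by
      rw [PySem.List.slice_from _ (by omega), PySem.List.slice_from _ (by omega), ht2, ht1,
        List.drop_succ_cons]
    have e2 : PySem.List.pyGetD (d :: rest) (j' + 1) 0 = PySem.List.pyGetD rest j' 0 := by
      rw [PySem.List.pyGetD_of_nonneg _ _ (by omega), PySem.List.pyGetD_of_nonneg _ _ (by omega),
        ht1, List.getD_cons_succ]
    have e3 : pvTrueRun res start (PySem.List.slice (d :: rest) none (some (j' + 1)))
        = pvTrueRun (res.insert (start, d - 1) true) d (PySem.List.slice rest none (some j')) := by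
      rw [PySem.List.slice_to _ (by omega), PySem.List.slice_to _ (by omega), ht1,
        List.take_succ_cons]
      rfl
    rw [e1, e2, e3]

-- MAIN B-side invariant: B's block loop computes the consuming walk over the spans
lemma MAIN (dots : List Int) (ai : List Int) (start : Int)
    (res : PySem.Dict (Int × Int) Bool) (fuel : Nat) (hfuel : dots.length ≤ fuel)
    (hs : dots.Pairwise (· < ·)) (hb : ∀ d ∈ dots, start ≤ d) :
    pvLoopBF fuel dots ai start res = pvConsume (pvSpansFrom start dots) ai res := by
  induction dots generalizing ai start res fuel with
  | nil =>
    cases fuel with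
    | zero => cases ai <;> simp [pvLoopBF, pvSpansFrom, pvConsume]
    | succ g => cases ai <;> simp [pvLoopBF, pvTrueRun, pvSpansFrom, pvConsume]
  | cons d rest ih =>
    cases fuel with
    | zero => simp at hfuel
    | succ g =>
      have hg : rest.length ≤ g := by simpa using hfuel
      cases ai with
      | nil => simp [pvLoopBF, pvSpansFrom, pvConsume]
      | cons a t =>
        have hpair := List.pairwise_cons.1 hs
        by_cases hastart : a < start
        · have hlhs : pvLoopBF (g + 1) (d :: rest) (a :: t) start res
              = (pvTrueRun res start (d :: rest)).1 := by
            rw [pvLoopBF]; simp [hastart]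
          rw [hlhs, NOMATCH1 _ _ _ _ _ hastart
            (fun e he => lt_of_lt_of_le hastart (hb e he))]
        · by_cases hda : d ≤ a
          · rw [UNROLL g d rest a t start res hs (hb d (by simp)) hda,
              ih (a :: t) d _ (g + 1) (by omega) hpair.2
                (fun e he => le_of_lt (hpair.1 e he))]
            simp only [pvSpansFrom, pvConsume]
            rw [if_neg (by omega)]
          · have hj : pvBS (d :: rest) a 0 (((d :: rest).length : Nat) : Int) = 0 :=
              pvIsBnd_uniq (pvBS_isBnd _ a hs) (pvIsBnd_zero (by omega) hs)
            have hlhs : pvLoopBF (g + 1) (d :: rest) (a :: t) start res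
                = pvLoopBF g rest t d (res.insert (start, d - 1) false) := by
              rw [pvLoopBF]
              simp only [List.isEmpty_cons, hj]
              rw [if_neg hastart, if_neg (show ¬(false = true) by simp),
                if_neg (show ¬((0:Int) = (((d :: rest).length : Nat) : Int)) from by simp; omega),
                PySem.List.remove?_cons_self]
              rw [show (0:Int) + 1 = 1 from rfl, PySem.List.slice_from_one]
              simp [pvTrueRun, PySem.List.slice_to _ (le_refl (0:Int)),
                PySem.List.pyGetD_of_nonneg]
            rw [hlhs, ih t d _ g hg hpair.2 (fun e he => le_of_lt (hpair.1 e he))]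
            simp only [pvSpansFrom, pvConsume]
            rw [if_pos (by omega), PySem.List.remove?_cons_self, Option.getD_some]

-- ===== VERDICT (by name: the statement is the Claim_ definition above) =====
theorem getTranlateDict_spec : Claim_equal_getTranlateDict := by
  intro ctx ai _
  unfold Spec_getTranlateDict
  obtain ⟨hsort, hbnd⟩ := Ldots ctx.toList 0
  simp only [getTranlateDict, getTranlateDict_alt]
  rw [L1, L4, MAIN _ ai 0 _ _ le_rfl hsort hbnd]
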